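-- pv_equiv track=rewrite | github.com/evgenydarkhanov/algorithms-and-data-structures | tasks/65_longest_common_substring.py | restore_substring
-- ===== SOURCE A (Python) =====
-- def restore_substring(str_1, str_2, table, max_value):
-- 	""" по идее, можно идти сразу по диагонали снизу вверх справа налево """
-- 	n = len(str_1)
-- 	m = len(str_2)
-- 	substring = ''
-- 	i, j = max_value[1], max_value[2]
--
-- 	while len(substring) < max_value[0]:
-- 		if str_1[i-1] == str_2[j-1]:
-- 			substring += str_1[i-1]
-- 			i -= 1
-- 			j -= 1
--
-- 	return substring[::-1]
-- ===== SOURCE B (Python) =====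
-- def restore_substring(str_1, str_2, table, max_value):
--     length, end, _ = max_value[:3]
--     return str_1[end - length:end]
-- ===== Notes on version B (the rewrite author's own statement) =====
-- stated objective: simpler
-- what changed: B reads the length and end coordinate from max_value and returns the single slice str_1[end-length:end] in closed form, instead of walking the DP diagonal character-by-character in a while loop and reversing the accumulated string.
-- outside the precondition, e.g. on restore_substring('aa', 'aa', [], [2, 1, 1]): A returns 'aa', B returns ''; on restore_substring('ab', 'ab', [], [-1, -1, 0]): A returns '', B returns 'a'
import Mathlib
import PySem

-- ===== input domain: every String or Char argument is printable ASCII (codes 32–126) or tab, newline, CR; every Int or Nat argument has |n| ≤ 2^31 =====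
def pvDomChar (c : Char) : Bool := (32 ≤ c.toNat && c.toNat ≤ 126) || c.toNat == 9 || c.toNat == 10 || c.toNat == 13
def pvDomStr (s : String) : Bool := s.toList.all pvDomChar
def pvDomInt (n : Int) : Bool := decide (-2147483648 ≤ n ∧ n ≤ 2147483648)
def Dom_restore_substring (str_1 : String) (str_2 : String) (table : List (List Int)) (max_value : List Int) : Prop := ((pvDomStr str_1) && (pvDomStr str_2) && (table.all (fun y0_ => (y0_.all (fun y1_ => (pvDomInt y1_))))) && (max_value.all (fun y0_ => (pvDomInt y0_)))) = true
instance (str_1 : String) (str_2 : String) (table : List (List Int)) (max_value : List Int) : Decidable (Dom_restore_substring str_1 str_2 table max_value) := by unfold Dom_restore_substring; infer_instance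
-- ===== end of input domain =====

-- B replaces A's character-by-character diagonal walk (which can diverge or wrap indices
-- on malformed coordinates) with a single closed-form slice str_1[end-length:end]: simpler.


-- ===== PORT A =====
-- the while loop of A; on the branch where Python would raise IndexError or loop forever
-- without progress (character mismatch) we stop and return the current accumulator —
-- those inputs lie outside Pre_restore_substring.
def pvLoopA (s1 s2 : List Char) (L i j : Int) (sub : List Char) : List Char :=
  if (sub.length : Int) < L then
    match PySem.List.pyGet? s1 (i - 1), PySem.List.pyGet? s2 (j - 1) with
    | some c1, some c2 =>
        if c1 = c2 then pvLoopA s1 s2 L (i - 1) (j - 1) (sub ++ [c1]) else sub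
    | _, _ => sub
  else sub
termination_by (L - sub.length).toNat
decreasing_by simp; omega

def restore_substring (str_1 : String) (str_2 : String) (table : List (List Int)) (max_value : List Int) : String :=
  let _n := str_1.toList.length
  let _m := str_2.toList.length
  match PySem.List.pyGet? max_value 1, PySem.List.pyGet? max_value 2 with
  | some i, some j =>
      -- max_value[0] read by the loop condition; in range whenever max_value[1] was
      let L := PySem.List.pyGetD max_value 0 0
      String.mk ((pvLoopA str_1.toList str_2.toList L i j []).reverse)   -- substring[::-1]
  | _, _ => ""  -- IndexError (outside Pre_)

-- ===== PORT B =====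
def restore_substring_alt (str_1 : String) (str_2 : String) (table : List (List Int)) (max_value : List Int) : String :=
  match PySem.List.slice max_value (some 0) (some 3) with   -- length, end, _ = max_value[:3]
  | [length, e, _j] =>
      String.mk (PySem.List.slice str_1.toList (some (e - length)) (some e))
  | _ => ""  -- ValueError from the unpacking (outside Pre_)

-- ===== PRECONDITION & SPEC =====
-- the position a Python slice bound x normalises to in a string of length n
def pvNorm (n : Nat) (x : Int) : Int := if 0 ≤ x then min x n else max (n + x) 0

-- Pre_ restricts to well-formed DP maxima: max_value has its three entries and either a
-- nonpositive claimed length whose slice bounds normalise to an empty range (A returns ''),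
-- a zero length, or a positive length with coordinates inside both strings whose diagonals
-- really carry a common substring; outside it A raises, diverges on a character mismatch,
-- or returns a value produced by Python's negative-index wraparound that no valid DP
-- table reaches.
def Pre_restore_substring (str_1 : String) (str_2 : String) (table : List (List Int)) (max_value : List Int) : Prop :=
  3 ≤ max_value.length ∧
  (let L := max_value.getD 0 0
   let i := max_value.getD 1 0
   let j := max_value.getD 2 0
   (L < 0 ∧ pvNorm str_1.toList.length i ≤ pvNorm str_1.toList.length (i - L)) ∨
   L = 0 ∨
   (0 < L ∧ L ≤ i ∧ i ≤ (str_1.toList.length : Int) ∧ L ≤ j ∧ j ≤ (str_2.toList.length : Int) ∧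
    PySem.List.slice str_1.toList (some (i - L)) (some i) =
      PySem.List.slice str_2.toList (some (j - L)) (some j)))
instance (str_1 : String) (str_2 : String) (table : List (List Int)) (max_value : List Int) : Decidable (Pre_restore_substring str_1 str_2 table max_value) := by unfold Pre_restore_substring; infer_instance

def pvWitness_restore_substring : String × String × List (List Int) × List Int :=
  ("ab", "cab", [], [2, 2, 3])

def Spec_restore_substring (str_1 : String) (str_2 : String) (table : List (List Int)) (max_value : List Int) (out : String) : Prop := out = restore_substring_alt str_1 str_2 table max_value
instance (str_1 : String) (str_2 : String) (table : List (List Int)) (max_value : List Int) (out : String) : Decidable (Spec_restore_substring str_1 str_2 table max_value out) := by unfold Spec_restore_substring; infer_instance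

-- ===== CLAIM (what is proved, stated in full; the proofs are below) =====
def Claim_equal_restore_substring : Prop := ∀ (str_1 : String) (str_2 : String) (table : List (List Int)) (max_value : List Int), Dom_restore_substring str_1 str_2 table max_value → Pre_restore_substring str_1 str_2 table max_value → Spec_restore_substring str_1 str_2 table max_value (restore_substring str_1 str_2 table max_value)

-- ===== LEMMAS AND PROOFS =====

lemma pv_slice_nil (xs : List Char) (a b : Int)
    (h : PySem.List.clampIdx xs.length b ≤ PySem.List.clampIdx xs.length a) :
    PySem.List.slice xs (some a) (some b) = [] := by
  have := PySem.List.length_slice xs a b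
  have : (PySem.List.slice xs (some a) (some b)).length = 0 := by omega
  exact List.eq_nil_of_length_eq_zero this

lemma pv_clampIdx_nonneg (n : Nat) (x : Int) (hx : 0 ≤ x) :
    PySem.List.clampIdx n x = min x.toNat n := by
  have : x = ((x.toNat : Nat) : Int) := by omega
  rw [this, PySem.List.clampIdx_natCast]
  omega

lemma pv_clampIdx_neg (n : Nat) (x : Int) (hx : x < 0) :
    PySem.List.clampIdx n x = n - (-x).toNat := by
  have h0 : 0 < (-x).toNat := by omega
  have : x = -(((-x).toNat : Nat) : Int) := by omega
  rw [this, PySem.List.clampIdx_neg_natCast _ _ h0]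
  omega

-- closed form for Python's index clamping, split on the sign of the index
lemma pv_clampIdx_eq (n : Nat) (x : Int) :
    ((PySem.List.clampIdx n x : Nat) : Int) = if 0 ≤ x then min x n else max (n + x) 0 := by
  split
  · rw [pv_clampIdx_nonneg _ _ (by omega)]; omega
  · rw [pv_clampIdx_neg _ _ (by omega)]; omega

-- last-character decomposition of a slice with in-range natural bounds
lemma pv_slice_snoc (xs : List Char) (a b : Nat) (hab : a < b) (hb : b ≤ xs.length) :
    PySem.List.slice xs (some (a : Int)) (some (b : Int)) =
      PySem.List.slice xs (some (a : Int)) (some ((b : Int) - 1)) ++ [xs.getD (b - 1) default] := by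
  have h1 : ((b : Int) - 1) = ((b - 1 : Nat) : Int) := by omega
  rw [h1, PySem.List.slice_natCast, PySem.List.slice_natCast]
  have h2 : b - a = (b - 1 - a) + 1 := by omega
  rw [h2, List.take_add_one]
  congr 1
  rw [List.getElem?_drop]
  have h4 : a + (b - 1 - a) = b - 1 := by omega
  rw [h4, List.getElem?_eq_getElem (by omega)]
  simp [List.getD_eq_getElem?_getD, List.getElem?_eq_getElem (show b - 1 < xs.length from by omega)]

-- the same decomposition with integer bounds
lemma pv_slice_snoc' (xs : List Char) (a b : Int) (h0 : 0 ≤ a) (hab : a < b) (hb : b ≤ (xs.length : Int)) :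
    PySem.List.slice xs (some a) (some b) =
      PySem.List.slice xs (some a) (some (b - 1)) ++ [xs.getD (b.toNat - 1) default] := by
  have ea : a = ((a.toNat : Nat) : Int) := by omega
  have eb : b = ((b.toNat : Nat) : Int) := by omega
  rw [ea, eb, pv_slice_snoc xs a.toNat b.toNat (by omega) (by omega)]
  simp
  rw [show (max b 0).toNat = b.toNat from by omega]

-- main loop invariant: with matching diagonals of length k below (i, j), the loop
-- appends exactly that diagonal to sub; the final reversal restores left-to-right order
lemma pv_loop_main (k : Nat) : ∀ (s1 s2 : List Char) (i j : Int) (sub : List Char),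
    (k : Int) ≤ i → i ≤ (s1.length : Int) → (k : Int) ≤ j → j ≤ (s2.length : Int) →
    PySem.List.slice s1 (some (i - (k : Int))) (some i) =
      PySem.List.slice s2 (some (j - (k : Int))) (some j) →
    pvLoopA s1 s2 ((sub.length : Int) + (k : Int)) i j sub =
      sub ++ (PySem.List.slice s1 (some (i - (k : Int))) (some i)).reverse := by
  induction k with
  | zero =>
      intro s1 s2 i j sub _ _ _ _ _
      rw [pvLoopA, if_neg (by push_cast; omega)]
      have e : i - (((0 : Nat) : Int)) = i := by push_cast; ring
      rw [e, pv_slice_nil s1 i i le_rfl]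
      simp
  | succ k ih =>
      intro s1 s2 i j sub hki hi hkj hj hslice
      have h1i : 1 ≤ i := by omega
      have h1j : 1 ≤ j := by omega
      have hs1 := pv_slice_snoc' s1 (i - ((k + 1 : Nat) : Int)) i (by omega) (by omega) hi
      have hs2 := pv_slice_snoc' s2 (j - ((k + 1 : Nat) : Int)) j (by omega) (by omega) hj
      have heq : PySem.List.slice s1 (some (i - ((k + 1 : Nat) : Int))) (some (i - 1)) ++ [s1.getD (i.toNat - 1) default]
               = PySem.List.slice s2 (some (j - ((k + 1 : Nat) : Int))) (some (j - 1)) ++ [s2.getD (j.toNat - 1) default] := by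
        rw [← hs1, ← hs2]; exact hslice
      obtain ⟨hinit, hlast⟩ := List.append_inj' heq (by simp)
      have hc : s1.getD (i.toNat - 1) default = s2.getD (j.toNat - 1) default := by
        simpa using hlast
      have hg1 : PySem.List.pyGet? s1 (i - 1) = some (s1.getD (i.toNat - 1) default) := by
        rw [show i - 1 = (((i - 1).toNat : Nat) : Int) from by omega, PySem.List.pyGet?_natCast,
            show (i - 1).toNat = i.toNat - 1 from by omega,
            List.getElem?_eq_getElem (by omega)]
        simp [List.getD_eq_getElem?_getD, List.getElem?_eq_getElem (show i.toNat - 1 < s1.length from by omega)]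
      have hg2 : PySem.List.pyGet? s2 (j - 1) = some (s2.getD (j.toNat - 1) default) := by
        rw [show j - 1 = (((j - 1).toNat : Nat) : Int) from by omega, PySem.List.pyGet?_natCast,
            show (j - 1).toNat = j.toNat - 1 from by omega,
            List.getElem?_eq_getElem (by omega)]
        simp [List.getD_eq_getElem?_getD, List.getElem?_eq_getElem (show j.toNat - 1 < s2.length from by omega)]
      rw [pvLoopA, if_pos (by push_cast; omega)]
      simp only [hg1, hg2]
      rw [if_pos hc]
      have hL : (sub.length : Int) + ((k + 1 : Nat) : Int) =
          (((sub ++ [s1.getD (i.toNat - 1) default]).length : Nat) : Int) + ((k : Nat) : Int) := by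
        simp only [List.length_append, List.length_cons, List.length_nil]
        push_cast
        omega
      rw [hL]
      have hih := ih s1 s2 (i - 1) (j - 1) (sub ++ [s1.getD (i.toNat - 1) default])
        (by omega) (by omega) (by omega) (by omega)
        (by rw [show i - 1 - ((k : Nat) : Int) = i - ((k + 1 : Nat) : Int) from by push_cast; ring,
                show j - 1 - ((k : Nat) : Int) = j - ((k + 1 : Nat) : Int) from by push_cast; ring]
            exact hinit)
      rw [hih, hs1,
          show i - 1 - ((k : Nat) : Int) = i - ((k + 1 : Nat) : Int) from by push_cast; ring]
      simp

-- ===== VERDICT (by name: the statement is the Claim_ definition above) =====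
theorem restore_substring_spec : Claim_equal_restore_substring := by
  intro str_1 str_2 table max_value _hdom hpre
  obtain ⟨hlen, hcase⟩ := hpre
  obtain ⟨a0, a1, a2, rest, hmv⟩ : ∃ a0 a1 a2 rest, max_value = a0 :: a1 :: a2 :: rest := by
    match max_value, hlen with
    | a0 :: a1 :: a2 :: rest, _ => exact ⟨a0, a1, a2, rest, rfl⟩
  subst hmv
  simp only [List.getD, List.getElem?_cons_zero, List.getElem?_cons_succ, Option.getD_some] at hcase
  unfold Spec_restore_substring restore_substring restore_substring_alt
  simp only [show PySem.List.slice (a0 :: a1 :: a2 :: rest) (some 0) (some 3) = [a0, a1, a2] from by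
      rw [PySem.List.slice_zero_start, PySem.List.slice_to _ (by norm_num)]
      rfl,
    show PySem.List.pyGet? (a0 :: a1 :: a2 :: rest) 1 = some a1 from by
      simpa using PySem.List.pyGet?_natCast (a0 :: a1 :: a2 :: rest) 1,
    show PySem.List.pyGet? (a0 :: a1 :: a2 :: rest) 2 = some a2 from by
      simpa using PySem.List.pyGet?_natCast (a0 :: a1 :: a2 :: rest) 2,
    show PySem.List.pyGetD (a0 :: a1 :: a2 :: rest) 0 0 = a0 from by
      simp [PySem.List.pyGetD, show PySem.List.pyGet? (a0 :: a1 :: a2 :: rest) 0 = some a0 from by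
        simpa using PySem.List.pyGet?_natCast (a0 :: a1 :: a2 :: rest) 0]]
  rcases hcase with ⟨hL, hB⟩ | hL | ⟨hL, h1, h2, h3, h4, h5⟩
  · -- L < 0: A's loop does not run; B's slice is empty by the Pre_ side condition
    rw [pvLoopA, if_neg (by simp; omega)]
    have hnil : PySem.List.slice str_1.toList (some (a1 - a0)) (some a1) = [] := by
      apply pv_slice_nil
      have c1 := pv_clampIdx_eq str_1.toList.length a1
      have c2 := pv_clampIdx_eq str_1.toList.length (a1 - a0)
      unfold pvNorm at hB
      split_ifs at c1 c2 hB <;> omega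
    rw [hnil]
    rfl
  · -- L = 0: the loop does not run and the slice s[e:e] is empty
    subst hL
    rw [pvLoopA, if_neg (by simp)]
    have hnil : PySem.List.slice str_1.toList (some (a1 - 0)) (some a1) = [] := by
      apply pv_slice_nil
      have e : a1 - 0 = a1 := by ring
      rw [e]
    rw [hnil]
    rfl
  · -- 0 < L, coordinates inside both strings, matching diagonals
    have hmain := pv_loop_main a0.toNat str_1.toList str_2.toList a1 a2 []
      (by omega) h2 (by omega) h4
      (by rw [show ((a0.toNat : Nat) : Int) = a0 from by omega]; exact h5)
    rw [show (((List.nil : List Char).length : Nat) : Int) + ((a0.toNat : Nat) : Int) = a0 from by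
        simp; omega] at hmain
    rw [show ((a0.toNat : Nat) : Int) = a0 from by omega] at hmain
    rw [hmain]
    simp
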